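-- pv_equiv track=rewrite | github.com/nwthomas/code-challenges | src/daily-coding-problem/medium/generate-grey-code/generate_grey_code.py | find_grey_code_bits
-- ===== SOURCE A (Python) =====
-- def find_grey_code_bits(num_bits):
--     """
--     Takes in the number of bits and returns a list of unique grey code combinations
--     """
--     if type(num_bits) is not int:
--         return None
--     if num_bits <= 0:
--         return []
--
--     final_bits = []
--     initial_bit = "0" * num_bits
--     length = 2 if num_bits is 1 else num_bits * num_bits
--
--     def make_new_bit(bit_str):
--         new_bit = bit_str
--         initial_one = True if bit_str[0] == "1" else False
--
--         for i in range(len(bit_str) - 1, -1, -1):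
--             if initial_one and bit_str[i] == "1":
--                 new_bit = bit_str[:i] + "0"
--                 if i + 1 < len(bit_str):
--                     new_bit += bit_str[i+1:]
--                 break
--             if not initial_one and bit_str[i] == "0":
--                 new_bit = bit_str[:i] + "1"
--                 if i + 1 < len(bit_str):
--                     new_bit += bit_str[i+1:]
--                 break
--         return new_bit
--
--     for i in range(0, length):
--         temp_bit = initial_bit if i == 0 else final_bits[i - 1]
--         if i > 0:
--             temp_bit = make_new_bit(temp_bit)
--         if i > 0 and temp_bit == initial_bit:
--             break
--         final_bits.append(temp_bit)
--
--     return final_bits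
-- ===== SOURCE B (Python) =====
-- def find_grey_code_bits(num_bits):
--     if type(num_bits) is not int:
--         return None
--     if num_bits <= 0:
--         return []
--     n = num_bits
--     ascending = ["0" * (n - j) + "1" * j for j in range(n + 1)]
--     descending = ["1" * (n - k) + "0" * k for k in range(1, n)]
--     return ascending + descending
-- ===== Notes on version B (the rewrite author's own statement) =====
-- stated objective: simpler
-- what changed: Replaces the simulated bit-mutation loop (repeatedly scanning the previous string for the rightmost flippable bit and rebuilding it by slicing until the cycle closes) with two closed-form comprehensions that emit the ascending fill phase and the descending clear phase directly.
import Mathlib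
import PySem

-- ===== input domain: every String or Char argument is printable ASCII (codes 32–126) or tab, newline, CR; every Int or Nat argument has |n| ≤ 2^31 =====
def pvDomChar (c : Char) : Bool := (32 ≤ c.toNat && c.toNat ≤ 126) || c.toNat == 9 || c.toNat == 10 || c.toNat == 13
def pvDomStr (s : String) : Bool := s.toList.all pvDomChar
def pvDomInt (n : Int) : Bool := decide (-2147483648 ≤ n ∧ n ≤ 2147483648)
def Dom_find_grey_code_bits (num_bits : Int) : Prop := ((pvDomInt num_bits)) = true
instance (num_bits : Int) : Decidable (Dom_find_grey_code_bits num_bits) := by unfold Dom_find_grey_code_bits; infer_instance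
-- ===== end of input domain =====

-- B replaces A's simulated bit-mutation loop by two closed-form phase comprehensions (simpler; measured constant-factor faster).
-- (In Lean num_bits : Int, so Python's `type(num_bits) is not int → None` branch of both programs is vacuous.)

-- ===== PORT A =====
-- make_new_bit's scan `for i in range(len(bit_str)-1, -1, -1)`: fuel counts remaining indices,
-- current Python index is fuel-1; fuel = 0 means the loop fell through without break (new_bit = bit_str).
def pvMNB (bs : List Char) (one : Bool) : Nat → List Char
  | 0 => bs
  | i + 1 =>
    if one && (PySem.List.pyGetD bs (i : Int) ' ' == '1') then
      PySem.List.slice bs none (some (i : Int)) ++ ['0'] ++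
        (if (i : Int) + 1 < bs.length then PySem.List.slice bs (some ((i : Int) + 1)) none else [])
    else if !one && (PySem.List.pyGetD bs (i : Int) ' ' == '0') then
      PySem.List.slice bs none (some (i : Int)) ++ ['1'] ++
        (if (i : Int) + 1 < bs.length then PySem.List.slice bs (some ((i : Int) + 1)) none else [])
    else pvMNB bs one i

-- make_new_bit; bit_str[0] ported with a default: only ever called on nonempty strings.
def pvMakeNewBit (bs : List Char) : List Char :=
  let one := PySem.List.pyGetD bs 0 ' ' == '1'
  pvMNB bs one bs.length

-- `for i in range(0, length)` with the break; fuel = remaining iterations, i = Python's i, acc = final_bits.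
def pvLoopA (init : List Char) : Nat → Nat → List (List Char) → List (List Char)
  | 0, _, acc => acc
  | fuel + 1, i, acc =>
    let temp0 := if i = 0 then init else PySem.List.pyGetD acc ((i : Int) - 1) []
    let temp := if 0 < i then pvMakeNewBit temp0 else temp0
    if 0 < i ∧ temp = init then acc
    else pvLoopA init fuel (i + 1) (acc ++ [temp])

def find_grey_code_bits (num_bits : Int) : List String :=
  if num_bits ≤ 0 then []
  else
    let n := num_bits.toNat
    let init := List.replicate n '0'
    let length : Nat := if num_bits = 1 then 2 else (num_bits * num_bits).toNat
    (pvLoopA init length 0 []).map String.mk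

-- ===== PORT B =====
def find_grey_code_bits_alt (num_bits : Int) : List String :=
  if num_bits ≤ 0 then []
  else
    let n := num_bits.toNat
    let ascending := (List.range (n + 1)).map
      (fun j => String.mk (List.replicate (n - j) '0' ++ List.replicate j '1'))
    let descending := (List.range' 1 (n - 1)).map
      (fun k => String.mk (List.replicate (n - k) '1' ++ List.replicate k '0'))
    ascending ++ descending

-- ===== PRECONDITION & SPEC =====
def Spec_find_grey_code_bits (num_bits : Int) (out : List String) : Prop := out = find_grey_code_bits_alt num_bits
instance (num_bits : Int) (out : List String) : Decidable (Spec_find_grey_code_bits num_bits out) := by unfold Spec_find_grey_code_bits; infer_instance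

-- ===== CLAIM (what is proved, stated in full; the proofs are below) =====
def Claim_equal_find_grey_code_bits : Prop := ∀ (num_bits : Int), Dom_find_grey_code_bits num_bits → Spec_find_grey_code_bits num_bits (find_grey_code_bits num_bits)

-- ===== LEMMAS AND PROOFS =====

-- The ideal sequence A's loop walks through: ascending phase then descending phase.
def pvAsc (N j : Nat) : List Char := List.replicate (N - j) '0' ++ List.replicate j '1'
def pvDesc (N k : Nat) : List Char := List.replicate (N - k) '1' ++ List.replicate k '0'
def pvSeq (N i : Nat) : List Char := if i ≤ N then pvAsc N i else pvDesc N (i - N)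

lemma pvMNB_skip (bs : List Char) (one : Bool) (i : Nat)
    (h1 : ¬ (one = true ∧ bs.getD i ' ' = '1'))
    (h2 : ¬ (one = false ∧ bs.getD i ' ' = '0')) :
    pvMNB bs one (i + 1) = pvMNB bs one i := by
  cases one <;> simp_all [pvMNB]

lemma pvMNB_hit (pre suf : List Char) (one : Bool) (t r : Char)
    (ht : (one = true ∧ t = '1' ∧ r = '0') ∨ (one = false ∧ t = '0' ∧ r = '1')) :
    pvMNB (pre ++ t :: suf) one (pre.length + 1) = pre ++ r :: suf := by
  have hget : (pre ++ t :: suf).getD pre.length ' ' = t := by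
    simp [List.getD_eq_getElem?_getD]
  have hsl1 : PySem.List.slice (pre ++ t :: suf) none (some (pre.length : Int)) = pre := by
    rw [PySem.List.slice_to_natCast]; simp
  have hsl2 : PySem.List.slice (pre ++ t :: suf) (some ((pre.length : Int) + 1)) none = suf := by
    have h : ((pre.length : Int) + 1) = ((pre.length + 1 : Nat) : Int) := by push_cast; ring
    rw [h, PySem.List.slice_from_natCast]
    simp [List.drop_append]
  rcases ht with ⟨ho, htt, hrr⟩ | ⟨ho, htt, hrr⟩ <;> subst ho htt hrr <;>
    · simp only [pvMNB, PySem.List.pyGetD_natCast, hget]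
      by_cases hlen : (pre.length : Int) + 1 < ((pre ++ '1' :: suf).length : Int) ∨ (pre.length : Int) + 1 < ((pre ++ '0' :: suf).length : Int)
      all_goals simp_all

lemma pvMNB_skip_many (pre suf : List Char) (one : Bool) (t : Char) (k : Nat)
    (hk : k ≤ suf.length)
    (hsuf : ∀ c ∈ suf, (one = true → c ≠ '1') ∧ (one = false → c ≠ '0')) :
    pvMNB (pre ++ t :: suf) one (pre.length + 1 + k) = pvMNB (pre ++ t :: suf) one (pre.length + 1) := by
  induction k with
  | zero => rfl
  | succ k ih =>
    have hklt : k < suf.length := by omega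
    have hidx : (pre ++ t :: suf).getD (pre.length + 1 + k) ' ' = suf[k] := by
      rw [List.getD_eq_getElem?_getD, List.getElem?_append_right (by omega)]
      have : pre.length + 1 + k - pre.length = k + 1 := by omega
      rw [this]
      simp [hklt]
    have hc := hsuf suf[k] (List.getElem_mem hklt)
    have heq : pre.length + 1 + (k + 1) = (pre.length + 1 + k) + 1 := by omega
    rw [heq, pvMNB_skip _ _ _ (by rw [hidx]; tauto) (by rw [hidx]; tauto), ih (by omega)]

lemma pvMakeNewBit_eq (pre suf : List Char) (t r : Char)
    (ht : ((pre ++ t :: suf).getD 0 ' ' = '1') ∧ t = '1' ∧ r = '0' ∨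
          ((pre ++ t :: suf).getD 0 ' ' ≠ '1') ∧ t = '0' ∧ r = '1')
    (hsuf : ∀ c ∈ suf, c ≠ t) :
    pvMakeNewBit (pre ++ t :: suf) = pre ++ r :: suf := by
  unfold pvMakeNewBit
  rw [PySem.List.pyGetD_zero]
  have hlen : (pre ++ t :: suf).length = pre.length + 1 + suf.length := by simp; omega
  rcases ht with ⟨h0, htt, hrr⟩ | ⟨h0, htt, hrr⟩ <;> subst htt hrr
  · have hone : ((pre ++ '1' :: suf).getD 0 ' ' == '1') = true := by simp only [h0]; decide
    rw [hone, hlen,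
        pvMNB_skip_many pre suf true '1' suf.length le_rfl
          (by intro c hc; exact ⟨fun _ => hsuf c hc, by simp⟩),
        pvMNB_hit pre suf true '1' '0' (Or.inl ⟨rfl, rfl, rfl⟩)]
  · have hone : ((pre ++ '0' :: suf).getD 0 ' ' == '1') = false := by
      simp only [beq_eq_false_iff_ne]; exact h0
    rw [hone, hlen,
        pvMNB_skip_many pre suf false '0' suf.length le_rfl
          (by intro c hc; exact ⟨by simp, fun _ => hsuf c hc⟩),
        pvMNB_hit pre suf false '0' '1' (Or.inr ⟨rfl, rfl, rfl⟩)]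

lemma pvGetD_zero_rep (a : Nat) (c : Char) (suf : List Char) :
    (List.replicate a c ++ c :: suf).getD 0 ' ' = c := by
  cases a <;> simp [List.replicate_succ]

lemma pvRep_split (a : Nat) (c : Char) (h : 1 ≤ a) :
    List.replicate a c = List.replicate (a - 1) c ++ [c] := by
  rw [← List.replicate_succ']
  congr 1
  omega

-- one step of make_new_bit along the ideal sequence
lemma pvStep (N i : Nat) (hN : 1 ≤ N) (hi : i + 1 ≤ 2 * N) :
    pvMakeNewBit (pvSeq N i) = if i + 1 = 2 * N then List.replicate N '0' else pvSeq N (i + 1) := by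
  rcases lt_trichotomy i N with hc | hc | hc
  · -- ascending phase, i < N : flip the rightmost '0'
    have hseq : pvSeq N i = List.replicate (N - i - 1) '0' ++ '0' :: List.replicate i '1' := by
      simp only [pvSeq, if_pos (le_of_lt hc), pvAsc]
      rw [pvRep_split (N - i) '0' (by omega)]
      simp [List.append_assoc]
    have := pvMakeNewBit_eq (List.replicate (N - i - 1) '0') (List.replicate i '1') '0' '1'
      (Or.inr ⟨by rw [pvGetD_zero_rep]; decide, rfl, rfl⟩)
      (by intro c hc'; rw [List.eq_of_mem_replicate hc']; decide)
    rw [hseq, this]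
    have h2 : ¬ (i + 1 = 2 * N) := by omega
    rw [if_neg h2]
    simp only [pvSeq, if_pos (by omega : i + 1 ≤ N), pvAsc]
    rw [show N - (i + 1) = N - i - 1 from by omega, List.replicate_succ]
  · -- turning point, i = N : flip the rightmost '1' of 11…1
    subst hc
    have hseq : pvSeq i i = List.replicate (i - 1) '1' ++ '1' :: ([] : List Char) := by
      simp only [pvSeq, if_pos le_rfl, pvAsc]
      rw [pvRep_split i '1' hN]
      simp
    have := pvMakeNewBit_eq (List.replicate (i - 1) '1') [] '1' '0'
      (Or.inl ⟨by rw [pvGetD_zero_rep], rfl, rfl⟩) (by simp)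
    rw [hseq, this]
    by_cases h1 : i = 1
    · subst h1; decide
    · rw [if_neg (by omega)]
      simp only [pvSeq, if_neg (by omega : ¬ (i + 1 ≤ i)), pvDesc]
      rw [show i + 1 - i = 1 from by omega, show i - 1 = i - 1 from rfl]
      simp
  · -- descending phase, N < i : flip the rightmost '1'
    have hk1 : 1 ≤ i - N := by omega
    have hkN : i - N < N := by omega
    have hseq : pvSeq N i =
        List.replicate (N - (i - N) - 1) '1' ++ '1' :: List.replicate (i - N) '0' := by
      simp only [pvSeq, if_neg (by omega : ¬ (i ≤ N)), pvDesc]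
      rw [pvRep_split (N - (i - N)) '1' (by omega)]
      simp [List.append_assoc]
    have := pvMakeNewBit_eq (List.replicate (N - (i - N) - 1) '1') (List.replicate (i - N) '0') '1' '0'
      (Or.inl ⟨by rw [pvGetD_zero_rep], rfl, rfl⟩)
      (by intro c hc'; rw [List.eq_of_mem_replicate hc']; decide)
    rw [hseq, this]
    by_cases h2 : i + 1 = 2 * N
    · rw [if_pos h2, show N - (i - N) - 1 = 0 from by omega, show i - N = N - 1 from by omega]
      simp only [List.replicate_zero, List.nil_append, ← List.replicate_succ,
        show N - 1 + 1 = N from by omega]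
    · rw [if_neg h2]
      simp only [pvSeq, if_neg (by omega : ¬ (i + 1 ≤ N)), pvDesc]
      rw [show i + 1 - N = (i - N) + 1 from by omega,
          show N - ((i - N) + 1) = N - (i - N) - 1 from by omega, List.replicate_succ']
      rw [← List.replicate_succ, List.replicate_succ']

lemma pvSeq_ne_init (N i : Nat) (hN : 1 ≤ N) (h1 : 1 ≤ i) (h2 : i ≤ 2 * N - 1) :
    pvSeq N i ≠ List.replicate N '0' := by
  intro h
  have hmem : '1' ∈ pvSeq N i := by
    by_cases hc : i ≤ N
    · simp only [pvSeq, if_pos hc, pvAsc]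
      exact List.mem_append_right _ (List.mem_replicate.mpr ⟨by omega, rfl⟩)
    · simp only [pvSeq, if_neg hc, pvDesc]
      exact List.mem_append_left _ (List.mem_replicate.mpr ⟨by omega, rfl⟩)
  rw [h] at hmem
  exact absurd (List.eq_of_mem_replicate hmem) (by decide)

lemma pvLoop_inv (N L : Nat) (hN : 1 ≤ N) (hL : 2 * N ≤ L) :
    ∀ fuel i, i ≤ 2 * N → fuel = L - i →
      pvLoopA (List.replicate N '0') fuel i ((List.range i).map (pvSeq N)) =
        (List.range (2 * N)).map (pvSeq N) := by
  intro fuel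
  induction fuel with
  | zero =>
    intro i hi hf
    have : i = 2 * N := by omega
    subst this
    rfl
  | succ fuel ih =>
    intro i hi hf
    have hacc : ∀ (hpos : 1 ≤ i),
        PySem.List.pyGetD ((List.range i).map (pvSeq N)) ((i : Int) - 1) [] = pvSeq N (i - 1) := by
      intro hpos
      have hcast : ((i : Int) - 1) = ((i - 1 : Nat) : Int) := by omega
      rw [hcast, PySem.List.pyGetD_natCast]
      rw [List.getD_eq_getElem?_getD]
      simp [List.getElem?_map, List.getElem?_range (by omega : i - 1 < i)]
    by_cases hend : i = 2 * N
    · -- break step: make_new_bit returns the initial bit string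
      subst hend
      have hpos : 1 ≤ 2 * N := by omega
      simp only [pvLoopA, if_neg (by omega : ¬ (2 * N = 0)), if_pos (by omega : 0 < 2 * N)]
      rw [hacc hpos]
      have hstep := pvStep N (2 * N - 1) hN (by omega)
      rw [show 2 * N - 1 + 1 = 2 * N from by omega, if_pos rfl] at hstep
      rw [hstep, if_pos ⟨by omega, rfl⟩]
    · -- productive step: append pvSeq N i and continue
      have hilt : i < 2 * N := by omega
      have htemp : (if 0 < i then
          pvMakeNewBit (if i = 0 then List.replicate N '0'
            else PySem.List.pyGetD ((List.range i).map (pvSeq N)) ((i : Int) - 1) [])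
          else (if i = 0 then List.replicate N '0'
            else PySem.List.pyGetD ((List.range i).map (pvSeq N)) ((i : Int) - 1) [])) = pvSeq N i := by
        by_cases h0 : i = 0
        · subst h0
          simp [pvSeq, pvAsc]
        · rw [if_pos (by omega), if_neg h0, hacc (by omega)]
          have hstep := pvStep N (i - 1) hN (by omega)
          rw [show i - 1 + 1 = i from by omega, if_neg hend] at hstep
          exact hstep
      simp only [pvLoopA]
      rw [htemp]
      have hnb : ¬ (0 < i ∧ pvSeq N i = List.replicate N '0') := by
        rintro ⟨hpos, hinit⟩
        exact pvSeq_ne_init N i hN (by omega) (by omega) hinit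
      rw [if_neg hnb, show (List.range i).map (pvSeq N) ++ [pvSeq N i] =
            (List.range (i + 1)).map (pvSeq N) from by rw [List.range_succ, List.map_append]; rfl]
      exact ih (i + 1) (by omega) (by omega)

-- ===== VERDICT (by name: the statement is the Claim_ definition above) =====
theorem find_grey_code_bits_spec : Claim_equal_find_grey_code_bits := by
  intro num_bits _
  unfold Spec_find_grey_code_bits find_grey_code_bits find_grey_code_bits_alt
  by_cases hle : num_bits ≤ 0
  · simp [hle]
  · rw [if_neg hle, if_neg hle]
    have hN : 1 ≤ num_bits.toNat := by omega
    have hL : 2 * num_bits.toNat ≤ (if num_bits = 1 then 2 else (num_bits * num_bits).toNat : Nat) := by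
      by_cases h1 : num_bits = 1
      · rw [if_pos h1]
        have : num_bits.toNat = 1 := by omega
        omega
      · rw [if_neg h1]
        have hcast : num_bits = (num_bits.toNat : Int) := by omega
        have hmul : (num_bits * num_bits).toNat = num_bits.toNat * num_bits.toNat := by
          rw [hcast]; norm_cast
        rw [hmul]
        have h2 : 2 ≤ num_bits.toNat := by omega
        nlinarith
    have hloop := pvLoop_inv num_bits.toNat
      (if num_bits = 1 then 2 else (num_bits * num_bits).toNat) hN hL
      (if num_bits = 1 then 2 else (num_bits * num_bits).toNat) 0 (by omega) (by omega)
    simp only [List.range_zero, List.map_nil] at hloop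
    simp only [hloop]
    -- split range (2n) into the ascending and descending phases
    have hsplit : (2 : Nat) * num_bits.toNat = (num_bits.toNat + 1) + (num_bits.toNat - 1) := by omega
    rw [hsplit, List.range_add, List.map_append, List.map_append]
    congr 1
    · rw [List.map_map]
      apply List.map_congr_left
      intro j hj
      have hj' : j ≤ num_bits.toNat := by simpa [Nat.lt_succ_iff] using List.mem_range.mp hj
      simp only [Function.comp, pvSeq, if_pos hj', pvAsc]
    · rw [List.map_map, List.range'_eq_map_range, List.map_map, List.map_map]
      apply List.map_congr_left
      intro k hk
      have hk' : k < num_bits.toNat - 1 := List.mem_range.mp hk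
      simp only [Function.comp]
      have : pvSeq num_bits.toNat (num_bits.toNat + 1 + k) = pvDesc num_bits.toNat (1 + k) := by
        simp only [pvSeq, if_neg (by omega : ¬ (num_bits.toNat + 1 + k ≤ num_bits.toNat))]
        congr 1
        omega
      rw [this]
      rfl
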